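-- pv_equiv track=rewrite | github.com/aws/deep-learning-containers | test/dlc_tests/container_tests/bin/habana_tests/tensorflow/google_tf_tests/v2.5.0/conftest.py | node_in_test_dict
-- ===== SOURCE A (Python) =====
-- def node_in_test_dict(test_dict, nodeid):
--     for key in test_dict:
--         if key.endswith('::') or key.endswith('.py') or key.endswith('/'):
--             if nodeid.startswith(key):
--                 return True
--         elif key == nodeid:
--             return True
--
--     return False
-- ===== SOURCE B (Python) =====
-- def node_in_test_dict(test_dict, nodeid):
--     keys = set(test_dict)
--     if nodeid in keys:
--         return True
--     for i in range(len(nodeid)):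
--         p = nodeid[:i]
--         if (p.endswith('::') or p.endswith('.py') or p.endswith('/')) and p in keys:
--             return True
--     return False
-- ===== Notes on version B (the rewrite author's own statement) =====
-- stated objective: alternative
-- what changed: Instead of scanning the keys and classifying each as prefix-style or exact, B indexes all keys in a hash set once and then walks the prefixes of nodeid, testing each suffix-marked prefix (and nodeid itself) for membership; the per-key scan disappears in favour of a scan over nodeid's positions.
import Mathlib
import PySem

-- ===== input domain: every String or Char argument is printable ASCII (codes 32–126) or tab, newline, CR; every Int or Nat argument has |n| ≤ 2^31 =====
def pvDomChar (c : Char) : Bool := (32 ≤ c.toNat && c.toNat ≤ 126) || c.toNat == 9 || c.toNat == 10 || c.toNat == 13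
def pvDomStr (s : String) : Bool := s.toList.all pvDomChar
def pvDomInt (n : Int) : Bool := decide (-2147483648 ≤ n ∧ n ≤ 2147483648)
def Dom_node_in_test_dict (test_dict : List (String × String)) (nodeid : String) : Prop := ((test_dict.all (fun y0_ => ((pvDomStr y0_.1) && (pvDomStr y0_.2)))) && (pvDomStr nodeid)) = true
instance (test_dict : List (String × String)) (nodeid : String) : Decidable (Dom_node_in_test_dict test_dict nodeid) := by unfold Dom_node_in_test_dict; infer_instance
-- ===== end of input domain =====

-- B inverts the traversal: instead of scanning the keys and classifying each, it indexes
-- the keys in a set once and walks the prefixes of nodeid (alternative, same cost).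
-- ===== PORT A =====
def pvGoA (nodeid : String) : List String → Bool
  | [] => false
  | k :: rest =>
    if PySem.Str.endswith k "::" || PySem.Str.endswith k ".py" || PySem.Str.endswith k "/" then
      if PySem.Str.startswith nodeid k then true else pvGoA nodeid rest
    else if k == nodeid then true else pvGoA nodeid rest

def node_in_test_dict (test_dict : List (String × String)) (nodeid : String) : Bool :=
  pvGoA nodeid (test_dict.map Prod.fst)

-- ===== PORT B =====
-- the 'for i in range(len(nodeid))' loop with early return
def pvGoB (keys : PySem.Set String) (nodeid : String) : List Int → Bool
  | [] => false
  | i :: rest =>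
    let p := PySem.Str.slice nodeid none (some i)
    if (PySem.Str.endswith p "::" || PySem.Str.endswith p ".py" || PySem.Str.endswith p "/")
        && PySem.Set.contains keys p then true
    else pvGoB keys nodeid rest

def node_in_test_dict_alt (test_dict : List (String × String)) (nodeid : String) : Bool :=
  let keys : PySem.Set String := PySem.Set.ofList (test_dict.map Prod.fst)
  if PySem.Set.contains keys nodeid then true
  else pvGoB keys nodeid (PySem.List.pyRange 0 (PySem.Str.len nodeid) 1)

-- ===== PRECONDITION & SPEC =====
def Spec_node_in_test_dict (test_dict : List (String × String)) (nodeid : String) (out : Bool) : Prop := out = node_in_test_dict_alt test_dict nodeid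
instance (test_dict : List (String × String)) (nodeid : String) (out : Bool) : Decidable (Spec_node_in_test_dict test_dict nodeid out) := by unfold Spec_node_in_test_dict; infer_instance

-- ===== CLAIM (what is proved, stated in full; the proofs are below) =====
def Claim_equal_node_in_test_dict : Prop := ∀ (test_dict : List (String × String)) (nodeid : String), Dom_node_in_test_dict test_dict nodeid → Spec_node_in_test_dict test_dict nodeid (node_in_test_dict test_dict nodeid)


-- ===== LEMMAS AND PROOFS =====
def pvS (p : String) : Bool :=
  PySem.Str.endswith p "::" || PySem.Str.endswith p ".py" || PySem.Str.endswith p "/"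

theorem pvContains_ofList (l : List String) (x : String) :
    PySem.Set.contains (PySem.Set.ofList l) x = l.contains x := by
  simp [PySem.Set.contains, PySem.Set.mem_ofList]

theorem pvStartswith_iff (s p : String) : PySem.Str.startswith s p = true ↔ p.toList <+: s.toList := by
  rw [show PySem.Str.startswith s p = PySem.Chars.startswith s.toList p.toList from by simp]
  exact PySem.Chars.startswith_iff _ _

theorem pvGoA_cons (nodeid k : String) (rest : List String) :
    pvGoA nodeid (k :: rest) =
      ((if pvS k then PySem.Str.startswith nodeid k else k == nodeid) || pvGoA nodeid rest) := by
  show (if pvS k = true then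
          (if PySem.Str.startswith nodeid k = true then true else pvGoA nodeid rest)
        else (if (k == nodeid) = true then true else pvGoA nodeid rest)) = _
  cases pvS k
  · cases k == nodeid <;> simp
  · cases PySem.Str.startswith nodeid k <;> simp

theorem pvGoA_any (nodeid : String) (keys : List String) :
    pvGoA nodeid keys =
      keys.any (fun k => if pvS k then PySem.Str.startswith nodeid k else k == nodeid) := by
  induction keys with
  | nil => rfl
  | cons k rest ih => rw [pvGoA_cons, ih, List.any_cons]

theorem pvGoB_cons (keys : PySem.Set String) (nodeid : String) (i : Int) (rest : List Int) :
    pvGoB keys nodeid (i :: rest) =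
      ((pvS (PySem.Str.slice nodeid none (some i))
          && PySem.Set.contains keys (PySem.Str.slice nodeid none (some i))) || pvGoB keys nodeid rest) := by
  show (if (pvS (PySem.Str.slice nodeid none (some i))
          && PySem.Set.contains keys (PySem.Str.slice nodeid none (some i))) = true then true
        else pvGoB keys nodeid rest) = _
  cases (pvS (PySem.Str.slice nodeid none (some i))
          && PySem.Set.contains keys (PySem.Str.slice nodeid none (some i))) <;> simp

theorem pvGoB_any (keys : PySem.Set String) (nodeid : String) (is : List Int) :
    pvGoB keys nodeid is =
      is.any (fun i => pvS (PySem.Str.slice nodeid none (some i))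
          && PySem.Set.contains keys (PySem.Str.slice nodeid none (some i))) := by
  induction is with
  | nil => rfl
  | cons i rest ih => rw [pvGoB_cons, ih, List.any_cons]

theorem pvSlice_toList (nodeid : String) (i : Int) (h : 0 ≤ i) :
    (PySem.Str.slice nodeid none (some i)).toList = nodeid.toList.take i.toNat := by
  rw [PySem.Str.toList_slice, PySem.Chars.slice_eq_listSlice, PySem.List.slice_to _ h]

-- ===== VERDICT (by name: the statement is the Claim_ definition above) =====
theorem node_in_test_dict_spec : Claim_equal_node_in_test_dict := by
  intro td nodeid _
  unfold Spec_node_in_test_dict node_in_test_dict node_in_test_dict_alt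
  set kl : List String := td.map Prod.fst with hkl
  rw [pvGoA_any]
  simp only [pvGoB_any, pvContains_ofList]
  rw [Bool.eq_iff_iff]
  by_cases hc : nodeid ∈ kl
  · have hcb : kl.contains nodeid = true := by simpa using hc
    simp only [hcb, if_true, iff_true, List.any_eq_true]
    refine ⟨nodeid, hc, ?_⟩
    cases hS : pvS nodeid
    · simp
    · simp only [if_true]
      exact (pvStartswith_iff _ _).mpr (List.prefix_refl _)
  · have hcb : kl.contains nodeid = false := by simpa using hc
    simp only [hcb, Bool.false_eq_true, if_false, List.any_eq_true]
    constructor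
    · rintro ⟨k, hk, hkc⟩
      cases hS : pvS k with
      | false =>
        rw [hS] at hkc; simp only [Bool.false_eq_true, if_false] at hkc
        have : k = nodeid := by simpa using hkc
        exact absurd (this ▸ hk) hc
      | true =>
        rw [hS] at hkc; simp only [if_true] at hkc
        have hpre : k.toList <+: nodeid.toList := (pvStartswith_iff _ _).mp hkc
        have hne : k ≠ nodeid := fun h => hc (h ▸ hk)
        have hlt : k.toList.length < nodeid.toList.length := by
          rcases lt_or_eq_of_le hpre.length_le with h | h
          · exact h
          · exfalso
            apply hne
            apply String.toList_inj.mp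
            have := List.prefix_iff_eq_take.mp hpre
            rw [this, h, List.take_length]
        refine ⟨(k.toList.length : Int), ?_, ?_⟩
        · rw [PySem.List.mem_pyRange_one]
          constructor
          · exact Int.natCast_nonneg _
          · unfold PySem.Str.len; exact_mod_cast hlt
        · have hsl : (PySem.Str.slice nodeid none (some (k.toList.length : Int))) = k := by
            apply String.toList_inj.mp
            rw [pvSlice_toList _ _ (Int.natCast_nonneg _)]
            simp only [Int.toNat_natCast]
            exact (List.prefix_iff_eq_take.mp hpre).symm
          rw [hsl, hS]
          simpa using hk
    · rintro ⟨i, hi, hcond⟩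
      rw [Bool.and_eq_true] at hcond
      have h0 : 0 ≤ i := ((PySem.List.mem_pyRange_one).mp hi).1
      set p := PySem.Str.slice nodeid none (some i) with hp
      have hpmem : p ∈ kl := by simpa using hcond.2
      refine ⟨p, hpmem, ?_⟩
      rw [hcond.1]
      simp only [if_true]
      rw [pvStartswith_iff]
      rw [hp, pvSlice_toList _ _ h0]
      exact List.take_prefix _ _
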